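-- pv_equiv track=rewrite | github.com/kpetrauskas92/Mont-Adventures-PP5 | trip_packages/views.py | months_to_seasons
-- ===== SOURCE A (Python) =====
-- def months_to_seasons(months):
--     seasons = []
--     if any(month in months for month in [12, 1, 2]):
--         seasons.append('Winter')
--     if any(month in months for month in [3, 4, 5]):
--         seasons.append('Spring')
--     if any(month in months for month in [6, 7, 8]):
--         seasons.append('Summer')
--     if any(month in months for month in [9, 10, 11]):
--         seasons.append('Autumn')
--     return ', '.join(seasons)
-- ===== SOURCE B (Python) =====
-- def months_to_seasons(months):
--     winter = spring = summer = autumn = False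
--     for m in months:
--         if m == 12 or 1 <= m <= 2:
--             winter = True
--         elif 3 <= m <= 5:
--             spring = True
--         elif 6 <= m <= 8:
--             summer = True
--         elif 9 <= m <= 11:
--             autumn = True
--     names = ('Winter', 'Spring', 'Summer', 'Autumn')
--     flags = (winter, spring, summer, autumn)
--     return ', '.join(name for name, flag in zip(names, flags) if flag)
-- ===== Notes on version B (the rewrite author's own statement) =====
-- stated objective: faster
-- what changed: Replaces A's four grouped any(month in months) membership scans (12 scans of the list) with a single pass over months that accumulates four season flags, then joins the flagged names in the fixed order.
import Mathlib
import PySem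

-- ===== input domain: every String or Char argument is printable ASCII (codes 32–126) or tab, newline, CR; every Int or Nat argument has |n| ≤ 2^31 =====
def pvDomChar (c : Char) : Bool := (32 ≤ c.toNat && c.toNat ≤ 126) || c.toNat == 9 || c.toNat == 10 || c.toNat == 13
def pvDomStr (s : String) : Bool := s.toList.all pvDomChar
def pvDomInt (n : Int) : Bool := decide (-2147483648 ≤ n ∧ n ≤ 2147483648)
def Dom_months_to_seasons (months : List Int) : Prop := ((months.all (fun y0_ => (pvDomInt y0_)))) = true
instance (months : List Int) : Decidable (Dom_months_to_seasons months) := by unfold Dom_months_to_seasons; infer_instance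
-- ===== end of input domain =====

-- B replaces A's four grouped `any(month in months)` membership scans with one pass over
-- `months` accumulating four season flags (objective: faster by a constant factor).


-- ===== PORT A =====
def months_to_seasons (months : List Int) : String :=
  let seasons : List String := []
  let seasons := if ([12, 1, 2] : List Int).any (fun month => months.contains month)
    then seasons ++ ["Winter"] else seasons
  let seasons := if ([3, 4, 5] : List Int).any (fun month => months.contains month)
    then seasons ++ ["Spring"] else seasons
  let seasons := if ([6, 7, 8] : List Int).any (fun month => months.contains month)
    then seasons ++ ["Summer"] else seasons
  let seasons := if ([9, 10, 11] : List Int).any (fun month => months.contains month)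
    then seasons ++ ["Autumn"] else seasons
  PySem.Str.join ", " seasons

-- ===== PORT B =====
-- the four conditions of Source B's if/elif chain, named
def pvW (m : Int) : Bool := m == 12 || (decide (1 ≤ m) && decide (m ≤ 2))
def pvS (m : Int) : Bool := decide (3 ≤ m) && decide (m ≤ 5)
def pvU (m : Int) : Bool := decide (6 ≤ m) && decide (m ≤ 8)
def pvA (m : Int) : Bool := decide (9 ≤ m) && decide (m ≤ 11)

-- one step of Source B's for-loop over the four flags
def pvStep (f : Bool × Bool × Bool × Bool) (m : Int) : Bool × Bool × Bool × Bool :=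
  if pvW m then (true, f.2.1, f.2.2.1, f.2.2.2)
  else if pvS m then (f.1, true, f.2.2.1, f.2.2.2)
  else if pvU m then (f.1, f.2.1, true, f.2.2.2)
  else if pvA m then (f.1, f.2.1, f.2.2.1, true)
  else f

def months_to_seasons_alt (months : List Int) : String :=
  let flags := months.foldl pvStep (false, false, false, false)
  let names : List String := ["Winter", "Spring", "Summer", "Autumn"]
  PySem.Str.join ", "
    (((names.zip [flags.1, flags.2.1, flags.2.2.1, flags.2.2.2]).filter
        (fun p => p.2)).map (fun p => p.1))

-- ===== PRECONDITION & SPEC =====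
def Spec_months_to_seasons (months : List Int) (out : String) : Prop := out = months_to_seasons_alt months
instance (months : List Int) (out : String) : Decidable (Spec_months_to_seasons months out) := by unfold Spec_months_to_seasons; infer_instance

-- ===== CLAIM (what is proved, stated in full; the proofs are below) =====
def Claim_equal_months_to_seasons : Prop := ∀ (months : List Int), Dom_months_to_seasons months → Spec_months_to_seasons months (months_to_seasons months)

-- ===== LEMMAS AND PROOFS =====

-- the loop invariant of B's single pass
lemma foldl_pvStep (l : List Int) (f : Bool × Bool × Bool × Bool) :
    l.foldl pvStep f = (f.1 || l.any pvW, f.2.1 || l.any pvS, f.2.2.1 || l.any pvU, f.2.2.2 || l.any pvA) := by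
  induction l generalizing f with
  | nil => simp
  | cons m l ih =>
    simp only [List.foldl_cons, List.any_cons, ih]
    have hc : (m = 12 ∨ (1 ≤ m ∧ m ≤ 2)) ∨ (3 ≤ m ∧ m ≤ 5) ∨ (6 ≤ m ∧ m ≤ 8) ∨
        (9 ≤ m ∧ m ≤ 11) ∨ (m ≤ 0 ∨ 13 ≤ m) := by omega
    rcases hc with h | h | h | h | h
    · have w : pvW m = true := by simp [pvW]; omega
      have s : pvS m = false := by simp [pvS]; omega
      have u : pvU m = false := by simp [pvU]; omega
      have a : pvA m = false := by simp [pvA]; omega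
      simp [pvStep, w, s, u, a]
    · have w : pvW m = false := by simp [pvW]; omega
      have s : pvS m = true := by simp [pvS]; omega
      have u : pvU m = false := by simp [pvU]; omega
      have a : pvA m = false := by simp [pvA]; omega
      simp [pvStep, w, s, u, a]
    · have w : pvW m = false := by simp [pvW]; omega
      have s : pvS m = false := by simp [pvS]; omega
      have u : pvU m = true := by simp [pvU]; omega
      have a : pvA m = false := by simp [pvA]; omega
      simp [pvStep, w, s, u, a]
    · have w : pvW m = false := by simp [pvW]; omega
      have s : pvS m = false := by simp [pvS]; omega
      have u : pvU m = false := by simp [pvU]; omega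
      have a : pvA m = true := by simp [pvA]; omega
      simp [pvStep, w, s, u, a]
    · have w : pvW m = false := by simp [pvW]; omega
      have s : pvS m = false := by simp [pvS]; omega
      have u : pvU m = false := by simp [pvU]; omega
      have a : pvA m = false := by simp [pvA]; omega
      simp [pvStep, w, s, u, a]

-- A's grouped membership tests equal B's single-pass predicates
lemma anyW (months : List Int) :
    ([12, 1, 2] : List Int).any (fun month => months.contains month) = months.any pvW := by
  rw [Bool.eq_iff_iff]
  simp only [List.any_eq_true, List.contains_iff_mem, List.mem_cons, List.not_mem_nil, pvW,
    Bool.or_eq_true, Bool.and_eq_true, decide_eq_true_eq, beq_iff_eq, or_false]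
  constructor
  · rintro ⟨m, hm, h⟩; exact ⟨m, h, by omega⟩
  · rintro ⟨m, hm, h⟩; exact ⟨m, by omega, hm⟩

lemma anyS (months : List Int) :
    ([3, 4, 5] : List Int).any (fun month => months.contains month) = months.any pvS := by
  rw [Bool.eq_iff_iff]
  simp only [List.any_eq_true, List.contains_iff_mem, List.mem_cons, List.not_mem_nil, pvS,
    Bool.and_eq_true, decide_eq_true_eq, or_false]
  constructor
  · rintro ⟨m, hm, h⟩; exact ⟨m, h, by omega⟩
  · rintro ⟨m, hm, h⟩; exact ⟨m, by omega, hm⟩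

lemma anyU (months : List Int) :
    ([6, 7, 8] : List Int).any (fun month => months.contains month) = months.any pvU := by
  rw [Bool.eq_iff_iff]
  simp only [List.any_eq_true, List.contains_iff_mem, List.mem_cons, List.not_mem_nil, pvU,
    Bool.and_eq_true, decide_eq_true_eq, or_false]
  constructor
  · rintro ⟨m, hm, h⟩; exact ⟨m, h, by omega⟩
  · rintro ⟨m, hm, h⟩; exact ⟨m, by omega, hm⟩

lemma anyA (months : List Int) :
    ([9, 10, 11] : List Int).any (fun month => months.contains month) = months.any pvA := by
  rw [Bool.eq_iff_iff]
  simp only [List.any_eq_true, List.contains_iff_mem, List.mem_cons, List.not_mem_nil, pvA,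
    Bool.and_eq_true, decide_eq_true_eq, or_false]
  constructor
  · rintro ⟨m, hm, h⟩; exact ⟨m, h, by omega⟩
  · rintro ⟨m, hm, h⟩; exact ⟨m, by omega, hm⟩

-- ===== VERDICT (by name: the statement is the Claim_ definition above) =====
theorem months_to_seasons_spec : Claim_equal_months_to_seasons := by
  intro months _
  unfold Spec_months_to_seasons months_to_seasons months_to_seasons_alt
  rw [foldl_pvStep, anyW, anyS, anyU, anyA]
  simp only [Bool.false_or]
  generalize months.any pvW = w
  generalize months.any pvS = s
  generalize months.any pvU = u
  generalize months.any pvA = a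
  cases w <;> cases s <;> cases u <;> cases a <;> rfl
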